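-- pv_equiv track=rewrite | github.com/HarshitSahu8/Training | Training/Day-3/q2.py | camel
-- ===== SOURCE A (Python) =====
-- def camel(King, Camel,size):
--     #cordinate(i,j)
--     i=Camel[0]
--     j=Camel[1]
--     while((i>=0 and j>=0) and(i>size and j>size)):
--         if i==King[0] and j==King[1]:
--             return True
--         i+=1
--         j+=1
--     i=Camel[0]
--     j=Camel[1]
--     while(i>=0 and j>=0):
--         if i==King[0] and j==King[1]:
--             return True
--         i-=1
--         j+=1
--     i=Camel[0]
--     j=Camel[1]
--     while(i>=0 and j>=0):
--         if i==King[0] and j==King[1]: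
--             return True
--         i-=1
--         j-=1
--     i=Camel[0]
--     j=Camel[1]
--     while(i>=0 and j>=0):
--         if i==King[0] and j==King[1]:
--             return True
--         i+=1
--         j-=1
--     return False
-- ===== SOURCE B (Python) =====
-- def camel(King, Camel, size):
--     c0, c1 = Camel[0], Camel[1]
--     k0, k1 = King[0], King[1]
--     if c0 < 0 or c1 < 0 or k0 < 0 or k1 < 0:
--         return False
--     return c0 + c1 == k0 + k1 or c0 - c1 == k0 - k1
-- ===== Notes on version B (the rewrite author's own statement) =====
-- stated objective: simpler
-- what changed: Replaces the four step-by-step diagonal walks with direct algebraic diagonal tests (equal sum or equal difference of coordinates, all coordinates non-negative), with no loop at all.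
-- intended difference: On inputs where King lies strictly up-right of Camel on the main diagonal (all coordinates >= 0, King0-King1 = Camel0-Camel1, Camel0 < King0), A returns False because its first loop, meant to walk that direction, is guarded by the never-sensible condition i>size and never runs on the board, while B returns True, the intended answer for 'King lies on Camel's diagonal'. — e.g. on camel([2, 1], [1, 0], 5): A returns false, B returns true
-- outside the precondition, e.g. on camel([3, 3], [2, 2], 1): A returns True, B returns True; on camel([], [-1, 0], 0): A returns False, B raises IndexError
import Mathlib
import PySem

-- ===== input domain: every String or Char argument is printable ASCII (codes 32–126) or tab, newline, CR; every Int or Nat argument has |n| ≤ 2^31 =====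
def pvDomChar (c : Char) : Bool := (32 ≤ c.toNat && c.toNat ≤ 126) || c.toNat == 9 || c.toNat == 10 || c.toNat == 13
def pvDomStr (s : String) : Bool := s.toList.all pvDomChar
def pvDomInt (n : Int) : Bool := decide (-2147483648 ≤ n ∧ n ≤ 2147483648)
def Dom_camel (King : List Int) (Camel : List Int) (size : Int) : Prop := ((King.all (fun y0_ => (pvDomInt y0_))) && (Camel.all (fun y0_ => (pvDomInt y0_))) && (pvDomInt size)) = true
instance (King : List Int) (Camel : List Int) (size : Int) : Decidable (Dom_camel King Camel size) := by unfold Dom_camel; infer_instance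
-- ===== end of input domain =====

-- B replaces A's four step-by-step diagonal walks by direct sum/difference diagonal tests; the equivalence is
-- stated outside D_camel, where A's miswritten first loop silently misses the up-right diagonal.

-- ===== PORT A =====
-- first while loop: condition (i>=0 and j>=0) and (i>size and j>size); the loop can only
-- return at step (k0-c0), so fuel (k0-c0).toNat+1 makes the same computation total
-- (fuel exhaustion corresponds to Python divergence, which Pre_camel excludes).
def camelLoop1 (k0 k1 size : Int) : Nat → Int → Int → Bool
  | 0, _, _ => false
  | n + 1, i, j =>
    if (0 ≤ i ∧ 0 ≤ j) ∧ (size < i ∧ size < j) then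
      if i = k0 ∧ j = k1 then true else camelLoop1 k0 k1 size n (i + 1) (j + 1)
    else false

-- second while loop: i -= 1, j += 1
def camelLoop2 (k0 k1 : Int) (i j : Int) : Bool :=
  if h : 0 ≤ i ∧ 0 ≤ j then
    if i = k0 ∧ j = k1 then true else camelLoop2 k0 k1 (i - 1) (j + 1)
  else false
termination_by (i + 1).toNat
decreasing_by omega

-- third while loop: i -= 1, j -= 1
def camelLoop3 (k0 k1 : Int) (i j : Int) : Bool :=
  if h : 0 ≤ i ∧ 0 ≤ j then
    if i = k0 ∧ j = k1 then true else camelLoop3 k0 k1 (i - 1) (j - 1)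
  else false
termination_by (i + 1).toNat
decreasing_by omega

-- fourth while loop: i += 1, j -= 1
def camelLoop4 (k0 k1 : Int) (i j : Int) : Bool :=
  if h : 0 ≤ i ∧ 0 ≤ j then
    if i = k0 ∧ j = k1 then true else camelLoop4 k0 k1 (i + 1) (j - 1)
  else false
termination_by (j + 1).toNat
decreasing_by omega

def camel (King : List Int) (Camel : List Int) (size : Int) : Bool :=
  match PySem.List.pyGet? Camel 0, PySem.List.pyGet? Camel 1,
        PySem.List.pyGet? King 0, PySem.List.pyGet? King 1 with
  | some c0, some c1, some k0, some k1 =>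
    if camelLoop1 k0 k1 size ((k0 - c0).toNat + 1) c0 c1 then true
    else if camelLoop2 k0 k1 c0 c1 then true
    else if camelLoop3 k0 k1 c0 c1 then true
    else if camelLoop4 k0 k1 c0 c1 then true
    else false
  | _, _, _, _ => false  -- IndexError in Python (outside Pre_camel)

-- ===== PORT B =====
def camel_alt (King : List Int) (Camel : List Int) (size : Int) : Bool :=
  -- the .getD false only totalizes the four lookups: Python raises IndexError there (outside Pre_camel)
  ((PySem.List.pyGet? Camel 0).bind fun c0 =>
   (PySem.List.pyGet? Camel 1).bind fun c1 =>
   (PySem.List.pyGet? King 0).bind fun k0 =>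
   (PySem.List.pyGet? King 1).map fun k1 =>
     if c0 < 0 ∨ c1 < 0 ∨ k0 < 0 ∨ k1 < 0 then false
     else decide (c0 + c1 = k0 + k1 ∨ c0 - c1 = k0 - k1)).getD false

-- ===== PRECONDITION & SPEC =====
-- Pre_camel excludes lists shorter than 2 (IndexError) and the inputs that enter A's first
-- while loop (Camel's two coordinates non-negative and both > size): there A diverges,
-- except when King happens to lie up-right of Camel on the main diagonal, where A returns True.
def Pre_camel (King : List Int) (Camel : List Int) (size : Int) : Prop :=
  2 ≤ King.length ∧ 2 ≤ Camel.length ∧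
  ¬ (0 ≤ Camel.getD 0 0 ∧ 0 ≤ Camel.getD 1 0 ∧ size < Camel.getD 0 0 ∧ size < Camel.getD 1 0)
instance (King : List Int) (Camel : List Int) (size : Int) : Decidable (Pre_camel King Camel size) := by unfold Pre_camel; infer_instance
def pvWitness_camel : List Int × List Int × Int := ([0, 1], [1, 0], 5)

-- On inputs where King lies strictly up-right of Camel on the main diagonal (all four
-- coordinates ≥ 0, King0-King1 = Camel0-Camel1, Camel0 < King0), A returns False because its
-- first loop — the one meant to walk that direction — is guarded by the never-sensible
-- condition i>size and never runs on the board; B returns True, the intended answer.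
def D_camel (King : List Int) (Camel : List Int) (size : Int) : Prop :=
  0 ≤ Camel.getD 0 0 ∧ 0 ≤ Camel.getD 1 0 ∧
  King.getD 0 0 - King.getD 1 0 = Camel.getD 0 0 - Camel.getD 1 0 ∧
  Camel.getD 0 0 < King.getD 0 0
instance (King : List Int) (Camel : List Int) (size : Int) : Decidable (D_camel King Camel size) := by unfold D_camel; infer_instance

def Spec_camel (King : List Int) (Camel : List Int) (size : Int) (out : Bool) : Prop :=
  ¬ D_camel King Camel size → out = camel_alt King Camel size
instance (King : List Int) (Camel : List Int) (size : Int) (out : Bool) : Decidable (Spec_camel King Camel size out) := by unfold Spec_camel; infer_instance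

def pvDiffWitness_camel : List Int × List Int × Int := ([2, 1], [1, 0], 5)
def pvDiffWitnessOut_camel : Bool × Bool := (false, true)

-- ===== CLAIM (what is proved, stated in full; the proofs are below) =====
def Claim_unchanged_camel : Prop := ∀ (King : List Int) (Camel : List Int) (size : Int), Dom_camel King Camel size → Pre_camel King Camel size → Spec_camel King Camel size (camel King Camel size)
def Claim_changed_camel : Prop := Dom_camel (pvDiffWitness_camel.1) (pvDiffWitness_camel.2.1) (pvDiffWitness_camel.2.2) ∧ Pre_camel (pvDiffWitness_camel.1) (pvDiffWitness_camel.2.1) (pvDiffWitness_camel.2.2) ∧ D_camel (pvDiffWitness_camel.1) (pvDiffWitness_camel.2.1) (pvDiffWitness_camel.2.2) ∧ camel (pvDiffWitness_camel.1) (pvDiffWitness_camel.2.1) (pvDiffWitness_camel.2.2) = pvDiffWitnessOut_camel.1 ∧ camel_alt (pvDiffWitness_camel.1) (pvDiffWitness_camel.2.1) (pvDiffWitness_camel.2.2) = pvDiffWitnessOut_camel.2 ∧ pvDiffWitnessOut_camel.1 ≠ pvDiffWitnessOut_camel.2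
def Claim_exact_camel : Prop := ∀ (King : List Int) (Camel : List Int) (size : Int), Dom_camel King Camel size → Pre_camel King Camel size → D_camel King Camel size → camel King Camel size ≠ camel_alt King Camel size

-- ===== LEMMAS AND PROOFS =====

theorem camelLoop2_eq (k0 k1 i j : Int) :
    camelLoop2 k0 k1 i j = true ↔ (0 ≤ j ∧ 0 ≤ k0 ∧ k0 ≤ i ∧ i + j = k0 + k1) := by
  induction i, j using camelLoop2.induct k0 k1 <;> rw [camelLoop2] <;> simp_all <;> omega

theorem camelLoop3_eq (k0 k1 i j : Int) :
    camelLoop3 k0 k1 i j = true ↔ (0 ≤ k0 ∧ 0 ≤ k1 ∧ k0 ≤ i ∧ i - j = k0 - k1) := by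
  induction i, j using camelLoop3.induct k0 k1 <;> rw [camelLoop3] <;> simp_all <;> omega

theorem camelLoop4_eq (k0 k1 i j : Int) :
    camelLoop4 k0 k1 i j = true ↔ (0 ≤ i ∧ 0 ≤ k1 ∧ k1 ≤ j ∧ i + j = k0 + k1) := by
  induction i, j using camelLoop4.induct k0 k1 <;> rw [camelLoop4] <;> simp_all <;> omega

theorem camelLoop1_not_entered (k0 k1 size : Int) (n : Nat) (i j : Int)
    (h : ¬ (0 ≤ i ∧ 0 ≤ j ∧ size < i ∧ size < j)) :
    camelLoop1 k0 k1 size (n + 1) i j = false := by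
  rw [camelLoop1, if_neg]
  tauto

-- the two top elements of a list of length ≥ 2
theorem two_le_length_destruct (xs : List Int) (h : 2 ≤ xs.length) :
    ∃ a b t, xs = a :: b :: t := by
  match xs with
  | a :: b :: t => exact ⟨a, b, t, rfl⟩
  | [] => simp at h
  | [a] => simp at h

-- full characterization of camel under Pre_camel, on destructured lists
theorem camel_char (k0 k1 c0 c1 size : Int) (kt ct : List Int)
    (hpre : ¬ (0 ≤ c0 ∧ 0 ≤ c1 ∧ size < c0 ∧ size < c1)) :
    camel (k0 :: k1 :: kt) (c0 :: c1 :: ct) size =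
      (camelLoop2 k0 k1 c0 c1 || camelLoop3 k0 k1 c0 c1 || camelLoop4 k0 k1 c0 c1) := by
  unfold camel
  have h1 : PySem.List.pyGet? (k0 :: k1 :: kt) 1 = some k1 := by
    simp [PySem.List.pyGet?, PySem.List.pyIdx?]
  have h2 : PySem.List.pyGet? (c0 :: c1 :: ct) 1 = some c1 := by
    simp [PySem.List.pyGet?, PySem.List.pyIdx?]
  simp only [PySem.List.pyGet?_zero_cons, h1, h2]
  rw [camelLoop1_not_entered k0 k1 size _ c0 c1 (by tauto)]
  cases camelLoop2 k0 k1 c0 c1 <;> cases camelLoop3 k0 k1 c0 c1 <;>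
    cases camelLoop4 k0 k1 c0 c1 <;> simp

theorem camel_alt_char (k0 k1 c0 c1 size : Int) (kt ct : List Int) :
    camel_alt (k0 :: k1 :: kt) (c0 :: c1 :: ct) size =
      if c0 < 0 ∨ c1 < 0 ∨ k0 < 0 ∨ k1 < 0 then false
      else decide (c0 + c1 = k0 + k1 ∨ c0 - c1 = k0 - k1) := by
  unfold camel_alt
  have h1 : PySem.List.pyGet? (k0 :: k1 :: kt) 1 = some k1 := by
    simp [PySem.List.pyGet?, PySem.List.pyIdx?]
  have h2 : PySem.List.pyGet? (c0 :: c1 :: ct) 1 = some c1 := by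
    simp [PySem.List.pyGet?, PySem.List.pyIdx?]
  simp only [PySem.List.pyGet?_zero_cons, h1, h2, Option.bind_some, Option.map_some,
    Option.getD_some]

-- ===== VERDICT (by name: the statement is the Claim_ definition above) =====
theorem camel_spec : Claim_unchanged_camel := by
  intro King Camel size _ hpre hnd
  obtain ⟨hk, hc, hloop1⟩ := hpre
  obtain ⟨k0, k1, kt, rfl⟩ := two_le_length_destruct King hk
  obtain ⟨c0, c1, ct, rfl⟩ := two_le_length_destruct Camel hc
  simp at hloop1
  unfold D_camel at hnd
  simp at hnd
  rw [camel_char k0 k1 c0 c1 size kt ct (by omega),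
      camel_alt_char k0 k1 c0 c1 size kt ct]
  rw [Bool.eq_iff_iff]
  simp only [Bool.or_eq_true, camelLoop2_eq, camelLoop3_eq, camelLoop4_eq]
  split_ifs with hif
  · simp only [iff_false]
    omega
  · simp only [decide_eq_true_eq]
    omega

theorem camel_changed : Claim_changed_camel := by
  unfold Claim_changed_camel
  refine ⟨by decide, by decide, by decide, ?_, ?_, by decide⟩
  · show camel [2, 1] [1, 0] 5 = false
    rw [camel_char 2 1 1 0 5 [] [] (by decide)]
    have h2 : camelLoop2 (2 : Int) 1 1 0 = false := by
      cases h : camelLoop2 (2 : Int) 1 1 0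
      · rfl
      · exact absurd ((camelLoop2_eq 2 1 1 0).mp h) (by decide)
    have h3 : camelLoop3 (2 : Int) 1 1 0 = false := by
      cases h : camelLoop3 (2 : Int) 1 1 0
      · rfl
      · exact absurd ((camelLoop3_eq 2 1 1 0).mp h) (by decide)
    have h4 : camelLoop4 (2 : Int) 1 1 0 = false := by
      cases h : camelLoop4 (2 : Int) 1 1 0
      · rfl
      · exact absurd ((camelLoop4_eq 2 1 1 0).mp h) (by decide)
    rw [h2, h3, h4]
    rfl
  · show camel_alt [2, 1] [1, 0] 5 = true
    rw [camel_alt_char 2 1 1 0 5 [] []]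
    decide

theorem camel_tight : Claim_exact_camel := by
  intro King Camel size _ hpre hd
  obtain ⟨hk, hc, hloop1⟩ := hpre
  obtain ⟨k0, k1, kt, rfl⟩ := two_le_length_destruct King hk
  obtain ⟨c0, c1, ct, rfl⟩ := two_le_length_destruct Camel hc
  simp at hloop1
  unfold D_camel at hd
  simp at hd
  obtain ⟨hc0, hc1, hdiag, hlt⟩ := hd
  rw [camel_char k0 k1 c0 c1 size kt ct (by omega),
      camel_alt_char k0 k1 c0 c1 size kt ct]
  have hB : (if c0 < 0 ∨ c1 < 0 ∨ k0 < 0 ∨ k1 < 0 then false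
      else decide (c0 + c1 = k0 + k1 ∨ c0 - c1 = k0 - k1)) = true := by
    rw [if_neg (by omega)]
    simp
    omega
  rw [hB]
  intro h
  simp only [Bool.or_eq_true, camelLoop2_eq, camelLoop3_eq, camelLoop4_eq] at h
  omega
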